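-- pv_equiv track=rewrite | github.com/Vilcius/constraint_gadgets | core/resource_estimation.py | _cnt_ctrl_add
-- ===== SOURCE A (Python) =====
-- from typing import Dict, List, Tuple
--
-- def _cnt_ctrl_add(ka: int, kb: int) -> Dict[str, int]:
--     """Gates for _controlled_addition with reg_a size ka, reg_b size kb."""
--     cry = cc_ry = 0
--     for ell in range(ka - 1, -1, -1):
--         lim = min(kb, ell + 1)
--         for j in range(lim):
--             if j == 0:
--                 cry += 1
--             else:
--                 cc_ry += 1
--     return {"CRY": cry, "CC_RY": cc_ry}
-- ===== SOURCE B (Python) =====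
-- def _cnt_ctrl_add(ka: int, kb: int):
--     """Gates for _controlled_addition: closed-form count, no loops."""
--     if ka <= 0 or kb <= 0:
--         return {"CRY": 0, "CC_RY": 0}
--     m = min(ka, kb)
--     total = m * (m + 1) // 2 + (ka - m) * kb
--     return {"CRY": ka, "CC_RY": total - ka}
-- ===== Notes on version B (the rewrite author's own statement) =====
-- stated objective: faster
-- what changed: Replaced the nested counting loops by a closed-form arithmetic formula: CRY = ka and CC_RY via a triangular-number sum split at min(ka, kb).
import Mathlib
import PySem

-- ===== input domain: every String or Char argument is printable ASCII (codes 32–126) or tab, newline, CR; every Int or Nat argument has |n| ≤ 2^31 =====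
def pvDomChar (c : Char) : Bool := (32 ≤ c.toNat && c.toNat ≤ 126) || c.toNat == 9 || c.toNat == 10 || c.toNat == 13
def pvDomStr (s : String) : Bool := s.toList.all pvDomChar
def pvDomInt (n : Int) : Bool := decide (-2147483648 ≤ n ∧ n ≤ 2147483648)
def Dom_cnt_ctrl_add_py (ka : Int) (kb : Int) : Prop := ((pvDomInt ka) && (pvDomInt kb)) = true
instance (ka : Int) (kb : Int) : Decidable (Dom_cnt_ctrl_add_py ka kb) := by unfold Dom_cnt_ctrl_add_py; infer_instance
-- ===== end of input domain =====

-- B replaces A's nested counting loops by a closed-form arithmetic formula (objective: faster, O(1) vs O(ka*kb)).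

-- ===== PORT A =====
-- inner loop body: j == 0 increments cry, else cc_ry
def pvInnerStep (q : Int × Int) (j : Int) : Int × Int :=
  if j == 0 then (q.1 + 1, q.2) else (q.1, q.2 + 1)

def cnt_ctrl_add_py (ka : Int) (kb : Int) : List (String × Int) :=
  let st := (PySem.List.pyRange (ka - 1) (-1) (-1)).foldl
    (fun p ell => (PySem.List.pyRange 0 (min kb (ell + 1)) 1).foldl pvInnerStep p) (0, 0)
  [("CRY", st.1), ("CC_RY", st.2)]

-- ===== PORT B =====
def cnt_ctrl_add_py_alt (ka : Int) (kb : Int) : List (String × Int) :=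
  if ka ≤ 0 ∨ kb ≤ 0 then [("CRY", 0), ("CC_RY", 0)]
  else
    let m := min ka kb
    let total := PySem.Int.floordiv (m * (m + 1)) 2 + (ka - m) * kb
    [("CRY", ka), ("CC_RY", total - ka)]

-- ===== PRECONDITION & SPEC =====
def Spec_cnt_ctrl_add_py (ka : Int) (kb : Int) (out : List (String × Int)) : Prop := out = cnt_ctrl_add_py_alt ka kb
instance (ka : Int) (kb : Int) (out : List (String × Int)) : Decidable (Spec_cnt_ctrl_add_py ka kb out) := by unfold Spec_cnt_ctrl_add_py; infer_instance

-- ===== CLAIM (what is proved, stated in full; the proofs are below) =====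
def Claim_equal_cnt_ctrl_add_py : Prop := ∀ (ka : Int) (kb : Int), Dom_cnt_ctrl_add_py ka kb → Spec_cnt_ctrl_add_py ka kb (cnt_ctrl_add_py ka kb)

-- ===== LEMMAS AND PROOFS =====

-- Σ_{e=1}^{n} (min kb e − 1): A's cc_ry count for ka = n (proof-only helper)
def pvCc (kb : Int) : Nat → Int
  | 0 => 0
  | n + 1 => pvCc kb n + (min kb ((n : Int) + 1) - 1)

-- inner fold over pyRange a lim 1 with 1 ≤ a never hits j = 0
theorem pvInner_pos (a lim : Int) (ha : 1 ≤ a) (q : Int × Int) :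
    (PySem.List.pyRange a lim 1).foldl pvInnerStep q = (q.1, q.2 + max (lim - a) 0) := by
  rw [PySem.List.pyRange_one, List.foldl_map]
  have h : ∀ (n : Nat) (q : Int × Int),
      (List.range n).foldl (fun q (k : Nat) => pvInnerStep q (a + (k : Int))) q = (q.1, q.2 + (n : Int)) := by
    intro n
    induction n with
    | zero => intro q; simp
    | succ n ih =>
      intro q
      rw [List.range_succ, List.foldl_append]
      rw [ih]
      simp only [List.foldl_cons, List.foldl_nil, pvInnerStep]
      have hne : (a + (n : Int) == 0) = false := by
        simp only [beq_eq_false_iff_ne]; omega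
      rw [hne]
      simp only [Bool.false_eq_true, if_false, Prod.mk.injEq]
      refine ⟨by simp, by push_cast; ring⟩
  rw [h]
  congr 1
  omega

-- one full inner loop: range(lim) with lim = min kb (ell+1)
theorem pvInner (lim : Int) (p : Int × Int) :
    (PySem.List.pyRange 0 lim 1).foldl pvInnerStep p =
      if lim ≤ 0 then p else (p.1 + 1, p.2 + (lim - 1)) := by
  by_cases h : lim ≤ 0
  · rw [PySem.List.pyRange_one_eq_nil (by omega)]
    simp [h]
  · rw [PySem.List.pyRange_one_cons (by omega)]
    simp only [List.foldl_cons]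
    have h0 : pvInnerStep p 0 = (p.1 + 1, p.2) := by simp [pvInnerStep]
    rw [h0, show (0 : Int) + 1 = 1 from by norm_num, pvInner_pos 1 lim (by omega)]
    simp only [if_neg h, Prod.mk.injEq]
    refine ⟨by simp, by omega⟩

-- outer loop, kb > 0: each of the n iterations adds 1 to cry and min kb (ell+1) − 1 to cc_ry
theorem pvOuter (kb : Int) (hkb : 0 < kb) (n : Nat) :
    ∀ (p : Int × Int),
      (PySem.List.pyRange ((n : Int) - 1) (-1) (-1)).foldl
        (fun p ell => (PySem.List.pyRange 0 (min kb (ell + 1)) 1).foldl pvInnerStep p) p =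
      (p.1 + (n : Int), p.2 + pvCc kb n) := by
  induction n with
  | zero =>
    intro p
    rw [PySem.List.pyRange_neg_one_eq_nil (by omega)]
    simp [pvCc]
  | succ n ih =>
    intro p
    have hc : ((n : Int) + 1 - 1 : Int) = (n : Int) := by omega
    rw [show (((n + 1 : Nat) : Int) - 1) = (n : Int) by push_cast; omega]
    rw [PySem.List.pyRange_neg_one_cons (by omega)]
    simp only [List.foldl_cons]
    rw [pvInner]
    have hlim : ¬ min kb ((n : Int) + 1) ≤ 0 := by omega
    rw [if_neg hlim]
    rw [show ((n : Int) - 1) = (((n : Nat) : Int) - 1) by rfl, ih]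
    simp only [pvCc, Prod.mk.injEq]
    exact ⟨by push_cast; ring, by ring⟩

-- closed form for pvCc: pvCc kb n = T(n) − n with T the split triangular sum
theorem pvCc_closed (kb : Int) (hkb : 0 < kb) (n : Nat) :
    pvCc kb n + (n : Int) =
      (min (n : Int) kb * (min (n : Int) kb + 1)) / 2 + ((n : Int) - min (n : Int) kb) * kb := by
  induction n with
  | zero => simp [pvCc, min_eq_left (by omega : (0 : Int) ≤ kb)]
  | succ n ih =>
    simp only [pvCc]
    by_cases h : (n : Int) + 1 ≤ kb
    · have hm' : min ((n : Int) + 1) kb = (n : Int) + 1 := by omega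
      have hm : min (n : Int) kb = (n : Int) := by omega
      have hmin : min kb ((n : Int) + 1) = (n : Int) + 1 := by omega
      rw [hm] at ih
      have hdiv : (((n : Int) + 1) * ((n : Int) + 1 + 1)) / 2
          = ((n : Int) * ((n : Int) + 1)) / 2 + ((n : Int) + 1) := by
        have he : ((n : Int) + 1) * ((n : Int) + 1 + 1) = (n : Int) * ((n : Int) + 1) + ((n : Int) + 1) * 2 := by ring
        rw [he, Int.add_mul_ediv_right _ _ (by norm_num : (2 : Int) ≠ 0)]
      push_cast
      rw [hm', hmin, hdiv]
      have h1 : (((n : Int) + 1) - ((n : Int) + 1)) * kb = 0 := by ring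
      have h2 : ((n : Int) - (n : Int)) * kb = 0 := by ring
      rw [h2] at ih
      rw [h1]
      linarith [ih]
    · have hm' : min ((n : Int) + 1) kb = kb := by omega
      have hm : min (n : Int) kb = kb := by omega
      have hmin : min kb ((n : Int) + 1) = kb := by omega
      rw [hm] at ih
      push_cast
      rw [hm', hmin]
      have hr : ((n : Int) + 1 - kb) * kb = ((n : Int) - kb) * kb + kb := by ring
      rw [hr]
      linarith [ih]

-- outer loop, kb ≤ 0: every inner range is empty, the state never changes
theorem pvOuter_nonpos (kb : Int) (hkb : kb ≤ 0) (l : List Int) :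
    ∀ (p : Int × Int),
      l.foldl (fun p ell => (PySem.List.pyRange 0 (min kb (ell + 1)) 1).foldl pvInnerStep p) p = p := by
  induction l with
  | nil => intro p; rfl
  | cons x xs ih =>
    intro p
    simp only [List.foldl_cons]
    rw [pvInner, if_pos (by omega)]
    exact ih p

-- ===== VERDICT (by name: the statement is the Claim_ definition above) =====
theorem cnt_ctrl_add_py_spec : Claim_equal_cnt_ctrl_add_py := by
  intro ka kb _
  unfold Spec_cnt_ctrl_add_py cnt_ctrl_add_py cnt_ctrl_add_py_alt
  by_cases hkb : kb ≤ 0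
  · rw [pvOuter_nonpos kb hkb]
    simp [if_pos (Or.inr hkb)]
  · by_cases hka : ka ≤ 0
    · rw [PySem.List.pyRange_neg_one_eq_nil (by omega)]
      simp [if_pos (Or.inl hka)]
    · have hka' : 0 < ka := by omega
      have hn : ((ka.toNat : Nat) : Int) = ka := by omega
      rw [show (ka - 1) = ((ka.toNat : Int) - 1) by omega]
      rw [pvOuter kb (by omega) ka.toNat]
      have hcc := pvCc_closed kb (by omega) ka.toNat
      rw [hn] at hcc
      rw [if_neg (by omega)]
      simp only [List.cons.injEq, Prod.mk.injEq, true_and, and_true, zero_add]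
      refine ⟨by omega, ?_⟩
      rw [PySem.Int.floordiv_eq_ediv_of_pos (by norm_num : (0 : Int) < 2)]
      linarith [hcc]
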